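-- pv_equiv track=rewrite | github.com/lchryu/LearnAlgorithm | SinhTest/Num/38.py | uocSo
-- ===== SOURCE A (Python) =====
-- MOD = 10**9 + 7
--
-- def uocSo(n, p):
--     ans = 0
--     i = p
--     while i <= n:
--         ans += n // i
--         ans %= MOD
--         i *= p
--     return ans
-- ===== SOURCE B (Python) =====
-- MOD = 10**9 + 7
--
-- def uocSo(n, p):
--     # Legendre's identity: exponent of p in n! = (n - s_p(n)) / (p - 1),
--     # where s_p(n) is the digit sum of n in base p.
--     if n < 0:
--         return 0
--     m, s = n, 0
--     while m > 0:
--         s += m % p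
--         m //= p
--     return (n - s) // (p - 1) % MOD
-- ===== Notes on version B (the rewrite author's own statement) =====
-- stated objective: alternative
-- what changed: Replaces the growing-divisor loop summing floor(n/p^k) by Legendre's closed identity: one loop over the base-p digits of n computing the digit sum s, then returning (n - s) // (p - 1) % MOD.
-- outside the precondition, e.g. on uocSo(5, -2): A returns 1000000004, B returns 1000000005; on uocSo(0, 1): A returns 0, B raises ZeroDivisionError; on uocSo(-2, -2): A returns 1, B returns 0
import Mathlib
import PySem

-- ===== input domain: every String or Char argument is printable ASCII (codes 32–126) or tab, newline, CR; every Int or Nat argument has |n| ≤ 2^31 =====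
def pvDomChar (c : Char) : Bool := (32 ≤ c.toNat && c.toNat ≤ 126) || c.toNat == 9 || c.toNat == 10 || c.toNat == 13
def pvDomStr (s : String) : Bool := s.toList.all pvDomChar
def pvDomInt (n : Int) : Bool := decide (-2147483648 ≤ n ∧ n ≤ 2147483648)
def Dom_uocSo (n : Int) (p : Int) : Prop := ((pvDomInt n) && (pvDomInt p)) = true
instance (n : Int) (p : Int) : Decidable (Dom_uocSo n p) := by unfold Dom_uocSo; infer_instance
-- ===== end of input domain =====

-- B replaces the floor-quotient sum by Legendre's digit-sum identity (alternative decomposition, same cost).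

def pyMOD : Int := 10 ^ 9 + 7

-- ===== PORT A =====
-- the while loop of A, fuel-bounded (for p ≥ 2 the loop runs at most n.toNat iterations, so the fuel never runs out on inputs in Pre_)
def uocSoLoopA (n p : Int) : Nat → Int → Int → Int
  | 0, ans, _ => ans
  | f + 1, ans, i =>
      if i ≤ n then uocSoLoopA n p f (PySem.Int.mod (ans + PySem.Int.floordiv n i) pyMOD) (i * p)
      else ans

def uocSo (n : Int) (p : Int) : Int :=
  uocSoLoopA n p (n.toNat + 1) 0 p

-- ===== PORT B =====
-- the while loop of B: base-p digit sum, fuel-bounded (for p ≥ 2, m shrinks each step)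
def uocSoDigits (p : Int) : Nat → Int → Int → Int
  | 0, s, _ => s
  | f + 1, s, m =>
      if 0 < m then uocSoDigits p f (s + PySem.Int.mod m p) (PySem.Int.floordiv m p)
      else s

def uocSo_alt (n : Int) (p : Int) : Int :=
  if n < 0 then 0
  else
    PySem.Int.mod (PySem.Int.floordiv (n - uocSoDigits p (n.toNat + 1) 0 n) (p - 1)) pyMOD

-- ===== PRECONDITION & SPEC =====
-- Pre_ admits every base p ≥ 2 (the function's meaningful domain: exponent of p in n!) and the trivial
-- inputs n < 0, n < p where A's loop never runs; on the remaining p ≤ 1 inputs A raises ZeroDivisionError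
-- (p = 0, n ≥ 0), loops forever (p = 1 or p = -1 with n ≥ 1), or returns an accidental alternating-sign
-- sum with no arithmetic meaning (p ≤ -2, p ≤ n < 0).
def Pre_uocSo (n : Int) (p : Int) : Prop := 2 ≤ p ∨ (n < 0 ∧ n < p)
instance (n : Int) (p : Int) : Decidable (Pre_uocSo n p) := by unfold Pre_uocSo; infer_instance

def pvWitness_uocSo : Int × Int := (100, 3)

def Spec_uocSo (n : Int) (p : Int) (out : Int) : Prop := out = uocSo_alt n p
instance (n : Int) (p : Int) (out : Int) : Decidable (Spec_uocSo n p out) := by unfold Spec_uocSo; infer_instance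

-- ===== CLAIM (what is proved, stated in full; the proofs are below) =====
def Claim_equal_uocSo : Prop := ∀ (n : Int) (p : Int), Dom_uocSo n p → Pre_uocSo n p → Spec_uocSo n p (uocSo n p)

-- ===== LEMMAS AND PROOFS =====

-- pure (un-modded) Legendre sum, same recursion shape as A's loop
def legSum (n p : Int) : Nat → Int → Int
  | 0, _ => 0
  | f + 1, i => if i ≤ n then n.fdiv i + legSum n p f (i * p) else 0

-- pure digit sum, same recursion shape as B's loop
def digSum (p : Int) : Nat → Int → Int
  | 0, _ => 0
  | f + 1, m => if 0 < m then m.fmod p + digSum p f (m.fdiv p) else 0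

theorem mod_eq_emod (a : Int) : PySem.Int.mod a pyMOD = a % pyMOD :=
  PySem.Int.mod_eq_emod_of_pos (a := a) (by norm_num [pyMOD])

-- A's loop computes the running sum mod pyMOD
theorem loopA_eq (n p : Int) : ∀ (f : Nat) (ans i : Int), 0 ≤ ans → ans < pyMOD →
    uocSoLoopA n p f ans i = (ans + legSum n p f i) % pyMOD := by
  intro f
  induction f with
  | zero =>
      intro ans i h0 h1
      simp [uocSoLoopA, legSum, Int.emod_eq_of_lt h0 h1]
  | succ f ih =>
      intro ans i h0 h1
      simp only [uocSoLoopA, legSum, PySem.Int.floordiv, mod_eq_emod]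
      split_ifs with h
      · have hpos : (0 : Int) < pyMOD := by norm_num [pyMOD]
        rw [ih _ _ (Int.emod_nonneg _ (by norm_num [pyMOD])) (Int.emod_lt_of_pos _ hpos),
           Int.emod_add_emod, add_assoc]
      · simp [Int.emod_eq_of_lt h0 h1]

-- B's loop accumulates the digit sum
theorem loopB_eq (p : Int) : ∀ (f : Nat) (s m : Int),
    uocSoDigits p f s m = s + digSum p f m := by
  intro f
  induction f with
  | zero => intro s m; simp [uocSoDigits, digSum]
  | succ f ih =>
      intro s m
      simp only [uocSoDigits, digSum, PySem.Int.mod, PySem.Int.floordiv]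
      split_ifs with h
      · rw [ih]; ring
      · simp

-- shifting the divisor by one factor of p = dividing n by p
theorem legSum_shift (p : Int) (hp : 2 ≤ p) : ∀ (f : Nat) (n i : Int), 0 ≤ n → 1 ≤ i →
    legSum n p f (p * i) = legSum (n.fdiv p) p f i := by
  intro f
  induction f with
  | zero => intro n i _ _; simp [legSum]
  | succ f ih =>
      intro n i hn hi
      have hp0 : (0 : Int) < p := by omega
      have hi0 : (0 : Int) < i := by omega
      have hcond : p * i ≤ n ↔ i ≤ n.fdiv p := by
        rw [Int.fdiv_eq_ediv_of_nonneg n (by omega : (0:Int) ≤ p),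
            Int.le_ediv_iff_mul_le hp0, mul_comm]
      have hnest : n.fdiv (p * i) = (n.fdiv p).fdiv i := by
        rw [Int.fdiv_fdiv_eq_fdiv_mul n (by omega : (0:Int) ≤ p) (by omega : (0:Int) ≤ i)]
      simp only [legSum]
      split_ifs with h1 h2 h3
      · rw [hnest, show p * i * p = p * (i * p) by ring,
            ih n (i * p) hn (by nlinarith)]
      · exact absurd (hcond.mp h1) h2
      · exact absurd (hcond.mpr h3) h1
      · rfl

theorem legSum_zero (p : Int) : ∀ (f : Nat) (i : Int), 0 < i → legSum 0 p f i = 0 := by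
  intro f
  induction f with
  | zero => intro i _; rfl
  | succ f ih =>
      intro i hi
      simp only [legSum, if_neg (by omega : ¬ (i ≤ (0:Int)))]

-- the key identity: (p-1) · Σ floor(n/p^k) = n − s_p(n)
theorem key (p : Int) (hp : 2 ≤ p) : ∀ (N : Nat) (n : Int), 0 ≤ n → n.toNat = N →
    ∀ f : Nat, N < f → (p - 1) * legSum n p f p = n - digSum p f n := by
  intro N
  induction N using Nat.strong_induction_on with
  | _ N ih =>
    intro n hn hN f1 hf
    obtain ⟨f, rfl⟩ : ∃ f', f1 = f' + 1 := ⟨f1 - 1, by omega⟩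
    by_cases hn0 : n = 0
    · subst hn0
      simp [legSum, digSum, show ¬ (p ≤ (0:Int)) by omega]
    · have hn1 : 0 < n := lt_of_le_of_ne hn (Ne.symm hn0)
      set q := n.fdiv p with hq
      have hq0 : 0 ≤ q := Int.fdiv_nonneg hn (by omega)
      have hqlt : q < n := by
        rw [hq, Int.fdiv_eq_ediv_of_nonneg n (by omega : (0:Int) ≤ p),
            Int.ediv_lt_iff_lt_mul (by omega : (0:Int) < p)]
        nlinarith
      have hd : digSum p (f + 1) n = n.fmod p + digSum p f q := by
        simp [digSum, hn1, ← hq]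
      have hl : legSum n p (f + 1) p = q + legSum q p f p := by
        simp only [legSum]
        by_cases hpn : p ≤ n
        · rw [if_pos hpn, legSum_shift p hp f n p hn (by omega), ← hq]
        · rw [if_neg hpn]
          have hqz : q = 0 := by
            rw [hq, Int.fdiv_eq_ediv_of_nonneg n (by omega : (0:Int) ≤ p)]
            exact Int.ediv_eq_zero_of_lt hn (by omega)
          rw [hqz, legSum_zero p f p (by omega)]
          ring
      have ihq := ih q.toNat (by omega) q hq0 rfl f (by omega)
      have hmod : n.fmod p = n - p * q := by
        have := Int.fmod_add_mul_fdiv n p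
        rw [← hq] at this
        linarith
      rw [hl, hd]
      linear_combination ihq + hmod

-- ===== VERDICT (by name: the statement is the Claim_ definition above) =====
theorem uocSo_spec : Claim_equal_uocSo := by
  intro n p _ hpre
  unfold Spec_uocSo uocSo uocSo_alt
  by_cases hneg : n < 0
  · have hnp : n < p := by rcases hpre with h | h <;> omega
    have hz : n.toNat = 0 := by omega
    rw [if_pos hneg, hz]
    simp [uocSoLoopA, show ¬ (p ≤ n) by omega]
  · have hp : (2 : Int) ≤ p := by rcases hpre with h | h <;> omega
    have hn : 0 ≤ n := by omega
    rw [if_neg hneg,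
        loopA_eq n p (n.toNat + 1) 0 p le_rfl (by norm_num [pyMOD]),
        loopB_eq p (n.toNat + 1) 0 n]
    have hkey := key p hp n.toNat n hn rfl (n.toNat + 1) (by omega)
    have hsub : n - (0 + digSum p (n.toNat + 1) n) = (p - 1) * legSum n p (n.toNat + 1) p := by
      linarith
    rw [hsub]
    have hcancel : PySem.Int.floordiv ((p - 1) * legSum n p (n.toNat + 1) p) (p - 1)
        = legSum n p (n.toNat + 1) p := by
      show ((p - 1) * legSum n p (n.toNat + 1) p).fdiv (p - 1) = _
      exact Int.mul_fdiv_cancel_left _ (by omega)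
    rw [hcancel, mod_eq_emod, zero_add]
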